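-- pv_equiv track=rewrite | github.com/mcodiglione/3dont | threedont/nl_2_sparql/lib.py | having_clean
-- ===== SOURCE A (Python) =====
-- def having_clean(grouping_list):
--     having_flag = False
--     temp_having_list = []
--     for row in grouping_list:
--         if "HAVING" in row:
--             temp_having_list.append(row)
--             if having_flag == False:
--                 having_temp = "HAVING ("
--                 temp_row = row[8:-1]
--                 having_temp = having_temp + temp_row
--                 having_flag = True
--             else:
--                 having_temp = having_temp + "&&" + temp_row
--     if having_flag == True:
--         having_temp = having_temp + ")"
--         for row in temp_having_list:
--             if row in grouping_list:
--                 grouping_list.remove(row)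
--         grouping_list.append(having_temp)
--     return grouping_list
-- ===== SOURCE B (Python) =====
-- def having_clean(grouping_list):
--     # Single pass: pull the condition out of each HAVING row, keep the rest.
--     # Mutates grouping_list in place like the original (slice assignment).
--     parts = [row[8:-1] for row in grouping_list if "HAVING" in row]
--     if not parts:
--         return grouping_list
--     kept = [row for row in grouping_list if "HAVING" not in row]
--     grouping_list[:] = kept + ["HAVING (" + "&&".join(parts) + ")"]
--     return grouping_list
-- ===== Notes on version B (the rewrite author's own statement) =====
-- stated objective: simpler
-- what changed: Replaces the flag/accumulator loop plus the second membership-test-and-remove pass with one comprehension pass that splits rows into HAVING conditions and kept rows and appends the merged clause; B also joins each HAVING row's own condition instead of A's stale first condition.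
-- intended difference: On lists with at least two HAVING rows whose bracketed conditions (row[8:-1]) are not all equal, A repeats the first row's condition for every later HAVING row (e.g. 'HAVING (x>1&&x>1)', losing 'y<2') because its temp_row variable is never updated in the else branch; B joins each row's own condition ('HAVING (x>1&&y<2)'), which is plainly what merging the HAVING clauses means. — e.g. on having_clean(["HAVING (x>1)", "HAVING (y<2)"]): A returns ["HAVING (x>1&&x>1)"], B returns ["HAVING (x>1&&y<2)"]
import Mathlib
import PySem

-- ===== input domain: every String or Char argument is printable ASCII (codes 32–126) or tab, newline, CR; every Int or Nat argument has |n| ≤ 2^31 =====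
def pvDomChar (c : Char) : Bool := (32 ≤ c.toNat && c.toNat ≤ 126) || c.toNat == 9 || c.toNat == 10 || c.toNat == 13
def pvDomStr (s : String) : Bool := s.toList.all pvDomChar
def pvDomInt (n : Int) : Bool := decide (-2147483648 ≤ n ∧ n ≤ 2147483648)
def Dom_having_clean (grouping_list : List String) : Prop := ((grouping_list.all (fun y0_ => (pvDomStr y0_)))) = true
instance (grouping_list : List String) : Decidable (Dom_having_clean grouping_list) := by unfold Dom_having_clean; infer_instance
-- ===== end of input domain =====

-- B merges the HAVING rows in ONE comprehension pass (filter/map + join) instead of A's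
-- flag-driven accumulation followed by a second membership-test-and-remove pass; both
-- mutate the Python list in place, the equivalence proved here is about the return value.
-- B intentionally joins each HAVING row's OWN condition where A repeats the first one (see D_).


-- "HAVING" in row
def hvP (row : String) : Bool := PySem.Str.isIn "HAVING" row

-- row[8:-1], on code points (exact on the ASCII domain)
def hvSl (row : String) : List Char := PySem.Chars.slice row.toList (some 8) (some (-1))

-- ===== PORT A =====
-- state: (having_flag, temp_having_list, having_temp, temp_row); having_temp/temp_row
-- are unset in Python before the flag is raised — initialised to [] here, read only after.
def havingStepA (st : Bool × List String × List Char × List Char) (row : String) :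
    Bool × List String × List Char × List Char :=
  let (flag, thl, ht, tr) := st
  if hvP row then
    let thl' := thl ++ [row]
    if flag = false then
      let tr' := hvSl row
      (true, thl', "HAVING (".toList ++ tr', tr')
    else
      (flag, thl', ht ++ "&&".toList ++ tr, tr)
  else st

-- second loop: for row in temp_having_list: if row in grouping_list: grouping_list.remove(row)
def havingRemoveStep (acc : List String) (row : String) : List String :=
  if row ∈ acc then (PySem.List.remove? acc row).getD acc else acc

def having_clean (grouping_list : List String) : List String :=
  let st := grouping_list.foldl havingStepA (false, [], [], [])
  if st.1 = true then
    let gl := st.2.1.foldl havingRemoveStep grouping_list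
    gl ++ [String.ofList (st.2.2.1 ++ [')'])]   -- string concat ported on List Char (exact)
  else grouping_list

-- ===== PORT B =====
def having_clean_alt (grouping_list : List String) : List String :=
  let parts := (grouping_list.filter (fun row => hvP row)).map hvSl
  if parts = [] then grouping_list
  else
    (grouping_list.filter (fun row => !hvP row)) ++
      [String.ofList ("HAVING (".toList ++ PySem.Chars.join "&&".toList parts ++ [')'])]

-- ===== PRECONDITION & SPEC =====
-- On lists with at least two HAVING rows whose bracketed conditions row[8:-1] are not all
-- equal, A repeats the FIRST row's condition for every later HAVING row (its temp_row is
-- never updated in the else branch), e.g. 'HAVING (x>1&&x>1)' losing 'y<2'; B joins each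
-- row's own condition, 'HAVING (x>1&&y<2)', which is what merging the HAVING clauses means.
def D_having_clean (grouping_list : List String) : Prop :=
  ¬ (grouping_list.filter (fun r => decide ("HAVING".toList <:+: r.toList))).Pairwise
      (fun a b => a.toList.dropLast.drop 8 = b.toList.dropLast.drop 8)
instance (grouping_list : List String) : Decidable (D_having_clean grouping_list) := by
  unfold D_having_clean; infer_instance

def Spec_having_clean (grouping_list : List String) (out : List String) : Prop :=
  ¬ D_having_clean grouping_list → out = having_clean_alt grouping_list
instance (grouping_list : List String) (out : List String) : Decidable (Spec_having_clean grouping_list out) := by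
  unfold Spec_having_clean; infer_instance

def pvDiffWitness_having_clean : List String := ["HAVING (x>1)", "HAVING (y<2)"]
def pvDiffWitnessOut_having_clean : (List String) × (List String) :=
  (["HAVING (x>1&&x>1)"], ["HAVING (x>1&&y<2)"])

-- ===== CLAIM (what is proved, stated in full; the proofs are below) =====
def Claim_unchanged_having_clean : Prop := ∀ (grouping_list : List String), Dom_having_clean grouping_list → Spec_having_clean grouping_list (having_clean grouping_list)
def Claim_changed_having_clean : Prop := Dom_having_clean (pvDiffWitness_having_clean) ∧ D_having_clean (pvDiffWitness_having_clean) ∧ having_clean (pvDiffWitness_having_clean) = pvDiffWitnessOut_having_clean.1 ∧ having_clean_alt (pvDiffWitness_having_clean) = pvDiffWitnessOut_having_clean.2 ∧ pvDiffWitnessOut_having_clean.1 ≠ pvDiffWitnessOut_having_clean.2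

-- ===== LEMMAS AND PROOFS =====

-- the HAVING test of the ports is the substring (infix) condition D_ is stated with
theorem hvP_eq_decide_infix (x : String) :
    hvP x = decide ("HAVING".toList <:+: x.toList) := by
  unfold hvP
  rw [show PySem.Str.isIn "HAVING" x = PySem.Chars.isIn "HAVING".toList x.toList from by
    simp]
  by_cases hi : "HAVING".toList <:+: x.toList
  · rw [(PySem.Chars.isIn_iff_infix _ _).2 hi, decide_eq_true hi]
  · rw [(PySem.Chars.isIn_eq_false_iff _ _).2 hi, decide_eq_false hi]

-- row[8:-1] is dropLast-then-drop-8, the form D_ is stated with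
theorem listSlice8Neg1 (xs : List Char) :
    PySem.List.slice xs (some 8) (some (-1)) = xs.dropLast.drop 8 := by
  simp only [PySem.List.slice, PySem.List.clampIdx]
  rcases eq_or_ne xs [] with h | h
  · simp [h]
  · by_cases h8 : 8 ≤ xs.length
    · simp [h, min_eq_left h8, List.dropLast_eq_take, List.drop_take]
      congr 1
      omega
    · have h1 : xs.dropLast.length ≤ 8 := by simp [List.length_dropLast]; omega
      have h2 : min 8 xs.length = xs.length := by omega
      simp [h, h2, List.drop_eq_nil_of_le h1]

theorem hvSl_eq (s : String) : hvSl s = s.toList.dropLast.drop 8 := by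
  show PySem.Chars.slice s.toList (some 8) (some (-1)) = _
  rw [PySem.Chars.slice_eq_listSlice, listSlice8Neg1]

-- once the flag is up, A's loop only appends: rows to temp_having_list, "&&"+temp_row to having_temp
theorem loopA_true (l : List String) (thl : List String) (ht tr : List Char) :
    l.foldl havingStepA (true, thl, ht, tr) =
      (true, thl ++ l.filter (fun row => hvP row),
       ht ++ ((l.filter (fun row => hvP row)).map (fun _ => "&&".toList ++ tr)).flatten, tr) := by
  induction l generalizing thl ht with
  | nil => simp
  | cons a l ih =>
      by_cases ha : hvP a
      · simp [List.foldl_cons, havingStepA, ha, ih, List.append_assoc]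
      · simp [List.foldl_cons, havingStepA, ha, ih]

-- characterisation of A's first loop from the initial state
theorem loopA_char (l : List String) :
    l.foldl havingStepA (false, [], [], []) =
      match l.filter (fun row => hvP row) with
      | [] => (false, [], [], [])
      | r :: rs =>
          (true, r :: rs,
           "HAVING (".toList ++ hvSl r ++ (rs.map (fun _ => "&&".toList ++ hvSl r)).flatten,
           hvSl r) := by
  induction l with
  | nil => simp
  | cons a l ih =>
      by_cases ha : hvP a
      · simp only [List.foldl_cons, havingStepA, ha, if_true, List.filter_cons_of_pos ha,
          List.nil_append]
        rw [loopA_true]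
        simp
      · simpa [List.foldl_cons, havingStepA, ha, List.filter_cons_of_neg ha] using ih

-- A's removal loop over the HAVING rows is exactly the filter keeping the non-HAVING rows
theorem removeLoop (l pre : List String) (hpre : ∀ x ∈ pre, hvP x = false) :
    (l.filter (fun row => hvP row)).foldl havingRemoveStep (pre ++ l) =
      pre ++ l.filter (fun row => !hvP row) := by
  induction l generalizing pre with
  | nil => simp
  | cons a l ih =>
      by_cases ha : hvP a
      · have hnotpre : a ∉ pre := fun h => by simp [hpre a h] at ha
        have hmem : a ∈ pre ++ a :: l := by simp
        rw [List.filter_cons_of_pos ha, List.foldl_cons]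
        have hrm : havingRemoveStep (pre ++ a :: l) a = pre ++ l := by
          rw [havingRemoveStep, if_pos hmem, PySem.List.remove?_eq_some_erase _ a hmem,
            Option.getD_some, List.erase_append_right _ hnotpre, List.erase_cons_head]
        rw [hrm, ih pre hpre, List.filter_cons_of_neg (by simp [ha])]
      · rw [List.filter_cons_of_neg ha, List.filter_cons_of_pos (by simp [ha])]
        have : pre ++ a :: l = (pre ++ [a]) ++ l := by simp
        rw [this, ih (pre ++ [a]) (by intro x hx; rcases List.mem_append.1 hx with h | h
                                      · exact hpre x h
                                      · simp at h; simpa [h] using ha)]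
        simp

-- join with the same piece everywhere = first piece then '&&'+piece blocks
theorem join_const (sep t : List Char) (n : Nat) :
    PySem.Chars.join sep (t :: List.replicate n t) =
      t ++ (List.replicate n (sep ++ t)).flatten := by
  induction n with
  | zero => simp [PySem.Chars.join_singleton]
  | succ n ih => simp only [List.replicate_succ, PySem.Chars.join_cons_cons, List.flatten_cons] at *
                 rw [ih]; simp [List.append_assoc]

-- ===== VERDICT (by name: the statement is the Claim_ definition above) =====
theorem having_clean_spec : Claim_unchanged_having_clean := by
  intro l _ hnD
  unfold having_clean having_clean_alt
  rw [loopA_char]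
  rcases hfs : l.filter (fun row => hvP row) with _ | ⟨r, rs⟩
  · simp
  · simp only
    have hfsD : l.filter (fun row => decide ("HAVING".toList <:+: row.toList)) = r :: rs := by
      rw [List.filter_congr (fun x _ => (hvP_eq_decide_infix x).symm), hfs]
    have hall : ∀ x ∈ rs, hvSl x = hvSl r := by
      have hpw := not_not.mp hnD
      rw [hfsD, List.pairwise_cons] at hpw
      intro x hx
      rw [hvSl_eq, hvSl_eq, hpw.1 x hx]
    have hrem := removeLoop l [] (by simp)
    rw [hfs] at hrem
    simp only [List.nil_append] at hrem
    rw [hrem]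
    have hmap : rs.map hvSl = rs.map (fun _ => hvSl r) := List.map_congr_left hall
    simp [hmap, join_const, List.append_assoc]

theorem having_clean_changed : Claim_changed_having_clean := by
  unfold Claim_changed_having_clean; decide
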